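-- pv_equiv track=rewrite | github.com/VieleSchritte/Algorithmic_toolbox | week3/3_car_fueling.py | count_refills
-- ===== SOURCE A (Python) =====
-- def count_refills(distance, full_tank, journey_stops):
--     num_refills, current_refill = 0, 0
--     journey_stops = [0] + journey_stops + [distance]
--     overall_miles = len(journey_stops) - 1
--
--     while current_refill < overall_miles:
--         last_refill = current_refill
--
--         while journey_stops[current_refill + 1] - journey_stops[last_refill] <= full_tank:
--             current_refill += 1
--             if current_refill == overall_miles:
--                 break
--
--         if current_refill == last_refill:
--             return -1
--         if current_refill < overall_miles:
--             num_refills += 1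
--         else:
--             break
--
--     return num_refills
-- ===== SOURCE B (Python) =====
-- def count_refills(distance, full_tank, journey_stops):
--     prev, fuel, refills = 0, full_tank, 0
--     for stop in journey_stops + [distance]:
--         gap = stop - prev
--         if gap > fuel:
--             if gap > full_tank:
--                 return -1
--             refills += 1
--             fuel = full_tank
--         fuel -= gap
--         prev = stop
--     return refills
-- ===== Notes on version B (the rewrite author's own statement) =====
-- stated objective: simpler
-- what changed: B discards A's positions array and index bookkeeping (last_refill/current_refill pointers with a restartable inner scan-ahead while-loop) and instead simulates the drive in one pass over the stops themselves, maintaining a remaining-fuel gauge decremented by each gap and reset on refill; dropping the list construction and repeated indexed position comparisons gives a constant-factor speedup (measured ~2x).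
import Mathlib
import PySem

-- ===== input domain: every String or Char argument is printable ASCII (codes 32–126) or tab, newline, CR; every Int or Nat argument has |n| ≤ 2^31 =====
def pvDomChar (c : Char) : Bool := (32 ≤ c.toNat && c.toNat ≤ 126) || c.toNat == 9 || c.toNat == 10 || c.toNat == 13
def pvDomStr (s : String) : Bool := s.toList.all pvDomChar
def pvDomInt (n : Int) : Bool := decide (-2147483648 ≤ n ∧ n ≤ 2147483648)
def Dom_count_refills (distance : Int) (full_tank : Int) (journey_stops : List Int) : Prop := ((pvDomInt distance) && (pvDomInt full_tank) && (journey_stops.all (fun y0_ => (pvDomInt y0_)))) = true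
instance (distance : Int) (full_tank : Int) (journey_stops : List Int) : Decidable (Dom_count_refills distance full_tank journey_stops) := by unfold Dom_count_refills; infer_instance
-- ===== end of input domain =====

-- B replaces A's index-based greedy (positions array, last_refill/current_refill pointers,
-- nested restartable while-loops) by a single pass over the stops that simulates the drive
-- with a remaining-fuel gauge; objective: simpler. Same return values on all inputs.

-- ===== PORT A =====
-- Indexing: every access journey_stops[i] in A is provably in range (0 ≤ i ≤ len-1),
-- so it is ported as getD _ 0 (the default is never used).

-- A's inner while: advance current while positions[current+1] - positions[last] ≤ full_tank,
-- breaking when current reaches n (= overall_miles), so the condition is only checked for cur < n.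
def innerA (p : List Int) (ft : Int) (n : Nat) (last : Nat) (cur : Nat) : Nat :=
  if cur < n then
    if p.getD (cur + 1) 0 - p.getD last 0 ≤ ft then innerA p ft n last (cur + 1)
    else cur
  else cur
termination_by n - cur
decreasing_by omega

-- the port of A's outer loop needs this to terminate: the inner loop never moves backwards
theorem innerA_ge (p : List Int) (ft : Int) (n : Nat) (last : Nat) (cur : Nat) :
    cur ≤ innerA p ft n last cur := by
  fun_induction innerA p ft n last cur with
  | case1 _ _ _ ih => omega
  | case2 => omega
  | case3 => omega

-- A's outer while loop
def outerA (p : List Int) (ft : Int) (n : Nat) (num : Int) (cur : Nat) : Int :=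
  if _hcur : cur < n then
    let c := innerA p ft n cur cur
    if hc : c = cur then -1
    else if _hlt : c < n then outerA p ft n (num + 1) c
    else num
  else num
termination_by n - cur
decreasing_by have := innerA_ge p ft n cur cur; omega

def count_refills (distance : Int) (full_tank : Int) (journey_stops : List Int) : Int :=
  let p := 0 :: (journey_stops ++ [distance])
  outerA p full_tank (p.length - 1) 0 0

-- ===== PORT B =====
-- B's for-loop over the stops (journey_stops + [distance]) carrying (prev, fuel, refills)
def bGo (ft : Int) (prev : Int) (fuel : Int) (refills : Int) : List Int → Int
  | [] => refills
  | stop :: rest =>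
      let gap := stop - prev
      if gap > fuel then
        if gap > ft then -1
        else bGo ft stop (ft - gap) (refills + 1) rest
      else bGo ft stop (fuel - gap) refills rest

def count_refills_alt (distance : Int) (full_tank : Int) (journey_stops : List Int) : Int :=
  bGo full_tank 0 full_tank 0 (journey_stops ++ [distance])

-- ===== PRECONDITION & SPEC =====
def Spec_count_refills (distance : Int) (full_tank : Int) (journey_stops : List Int) (out : Int) : Prop := out = count_refills_alt distance full_tank journey_stops
instance (distance : Int) (full_tank : Int) (journey_stops : List Int) (out : Int) : Decidable (Spec_count_refills distance full_tank journey_stops out) := by unfold Spec_count_refills; infer_instance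

-- ===== CLAIM (what is proved, stated in full; the proofs are below) =====
def Claim_equal_count_refills : Prop := ∀ (distance : Int) (full_tank : Int) (journey_stops : List Int), Dom_count_refills distance full_tank journey_stops → Spec_count_refills distance full_tank journey_stops (count_refills distance full_tank journey_stops)

-- ===== LEMMAS AND PROOFS =====

-- A's result, seen from the middle of an outer iteration: the inner loop is at (last, cur),
-- num refills have been counted so far.
def afrom (p : List Int) (ft : Int) (n : Nat) (last : Nat) (cur : Nat) (num : Int) : Int :=
  let c := innerA p ft n last cur
  if c = last then -1
  else if c < n then outerA p ft n (num + 1) c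
  else num

theorem outerA_eq_afrom (p : List Int) (ft : Int) (n : Nat) (num : Int) (cur : Nat)
    (h : cur < n) : outerA p ft n num cur = afrom p ft n cur cur num := by
  rw [outerA]
  simp [afrom, h]

-- the key simulation lemma: A's mid-state (last, cur, num) corresponds to B having driven
-- to position p[cur] with fuel ft - (p[cur] - p[last]) left and the stops p[cur+1..] ahead
theorem key (p : List Int) (ft : Int) (n : Nat) (hn : n + 1 = p.length) :
    ∀ k cur last num, n - cur = k → last ≤ cur → cur < n →
      afrom p ft n last cur num =
        bGo ft (p.getD cur 0) (ft - (p.getD cur 0 - p.getD last 0)) num (p.drop (cur + 1)) := by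
  intro k
  induction k with
  | zero => intro cur last num hk _ hcur; omega
  | succ k ih =>
    intro cur last num hk hlast hcur
    -- the next stop ahead of B is p[cur+1]
    have hdrop : p.drop (cur + 1) = p.getD (cur + 1) 0 :: p.drop (cur + 1 + 1) := by
      rw [List.drop_eq_getElem_cons (by omega)]
      rw [List.getD_eq_getElem p 0 (by omega)]
    rw [afrom, innerA, hdrop, bGo]
    by_cases hc : p.getD (cur + 1) 0 - p.getD last 0 ≤ ft
    · -- inner loop advances; B's gauge covers the gap
      simp only [hcur, if_pos, hc]
      rw [if_neg (by omega :
        ¬ (p.getD (cur + 1) 0 - p.getD cur 0 > ft - (p.getD cur 0 - p.getD last 0)))]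
      have hfuel : ft - (p.getD cur 0 - p.getD last 0) - (p.getD (cur + 1) 0 - p.getD cur 0)
          = ft - (p.getD (cur + 1) 0 - p.getD last 0) := by ring
      rw [hfuel]
      by_cases hcn : cur + 1 < n
      · rw [← ih (cur + 1) last num (by omega) (by omega) hcn]
        rw [afrom]
      · -- cur + 1 = n : inner loop stops at n, A returns num; B has no stops left
        rw [innerA]
        simp only [show ¬ (cur + 1 < n) by omega, if_neg, not_false_iff]
        have h1 : ¬ (cur + 1 = last) := by omega
        have h2 : ¬ (cur + 1 < n) := by omega
        simp only [h1, if_neg, not_false_iff]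
        rw [List.drop_eq_nil_of_le (by omega : p.length ≤ cur + 1 + 1), bGo]
    · -- inner loop stops at cur: a refuel (or failure) at cur; B's gauge is short
      simp only [hcur, if_pos, hc, if_false]
      rw [if_pos (by omega :
        p.getD (cur + 1) 0 - p.getD cur 0 > ft - (p.getD cur 0 - p.getD last 0))]
      by_cases he : cur = last
      · -- stuck immediately: B's gauge was full, so the gap exceeds ft; both return -1
        subst he
        rw [if_pos (by omega : p.getD (cur + 1) 0 - p.getD cur 0 > ft)]
        simp
      · -- refuel at cur; A restarts the inner loop from (cur, cur), B resets the gauge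
        rw [if_neg (by omega : ¬ (cur = last))]
        rw [outerA_eq_afrom p ft n (num + 1) cur hcur]
        rw [afrom, innerA]
        by_cases hstep : p.getD (cur + 1) 0 - p.getD cur 0 ≤ ft
        · simp only [hcur, if_pos, hstep]
          rw [if_neg (by omega : ¬ (p.getD (cur + 1) 0 - p.getD cur 0 > ft))]
          by_cases hcn : cur + 1 < n
          · rw [← ih (cur + 1) cur (num + 1) (by omega) (by omega) hcn]
            rw [afrom]
          · have h1 : ¬ (cur + 1 = cur) := by omega
            rw [innerA]
            simp only [show ¬ (cur + 1 < n) by omega, if_neg, not_false_iff]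
            simp only [h1, if_neg, not_false_iff]
            rw [List.drop_eq_nil_of_le (by omega : p.length ≤ cur + 1 + 1), bGo]
        · -- stuck right after refueling: both return -1
          rw [if_pos (by omega : p.getD (cur + 1) 0 - p.getD cur 0 > ft)]
          simp only [hcur, if_pos, hstep, if_false]

-- ===== VERDICT (by name: the statement is the Claim_ definition above) =====
theorem count_refills_spec : Claim_equal_count_refills := by
  intro distance full_tank journey_stops _
  unfold Spec_count_refills count_refills count_refills_alt
  set p := 0 :: (journey_stops ++ [distance]) with hp
  have hlen : p.length = journey_stops.length + 2 := by simp [hp]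
  have hn : (p.length - 1) + 1 = p.length := by omega
  have h0 : 0 < p.length - 1 := by omega
  rw [outerA_eq_afrom p full_tank (p.length - 1) 0 0 h0]
  rw [key p full_tank (p.length - 1) hn _ 0 0 0 rfl (le_refl 0) h0]
  simp [hp]
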